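-- pv_equiv track=rewrite | github.com/gyagp/backpack | runtimes/python/onnx_loader.py | _onnx_norm_to_backpack
-- ===== SOURCE A (Python) =====
-- from typing import Dict, List, Optional
--
-- def _onnx_norm_to_backpack(onnx_name: str) -> Optional[str]:
--     """Map ONNX norm weight names to backpack convention."""
--     name = onnx_name.replace("model.", "")
--     # Final norm (e.g. model.layers.32.final_norm_layernorm.weight)
--     if "final_norm" in name:
--         return "norm.weight"
--     if "input_layernorm" in name:
--         parts = name.split('.')
--         for i, p in enumerate(parts):
--             if p.startswith("layers") and i + 1 < len(parts) and parts[i+1].isdigit():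
--                 return f"layers.{parts[i+1]}.input_layernorm.weight"
--     if "post_attention_layernorm" in name:
--         parts = name.split('.')
--         for i, p in enumerate(parts):
--             if p.startswith("layers") and i + 1 < len(parts) and parts[i+1].isdigit():
--                 return f"layers.{parts[i+1]}.post_attention_layernorm.weight"
--     if "norm.weight" in name and "layers" not in name:
--         return "norm.weight"
--     return None
-- ===== SOURCE B (Python) =====
-- from typing import Optional
--
-- def _onnx_norm_to_backpack(onnx_name: str) -> Optional[str]:
--     """Map ONNX norm weight names to backpack convention.
--
--     Single left-to-right character pass: a tiny state machine keeps the
--     current dot-delimited token and the previous one; whenever a token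
--     completes it checks the (previous, current) pair. No split(), no
--     token list, no index arithmetic."""
--     name = onnx_name.replace("model.", "")
--     if "final_norm" in name:
--         return "norm.weight"
--     if "input_layernorm" in name:
--         kind = "input_layernorm"
--     elif "post_attention_layernorm" in name:
--         kind = "post_attention_layernorm"
--     else:
--         kind = None
--     if kind is not None:
--         idx = _layer_index(name)
--         if idx is not None:
--             return f"layers.{idx}.{kind}.weight"
--     if "norm.weight" in name and "layers" not in name:
--         return "norm.weight"
--     return None
--
-- def _layer_index(name: str) -> Optional[str]:
--     """First dot-delimited all-digit token whose predecessor token starts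
--     with 'layers', found in one character scan ('.' sentinel ends the
--     last token)."""
--     prev = None
--     cur = ""
--     for ch in name + ".":
--         if ch == '.':
--             if prev is not None and prev.startswith("layers") and cur.isdigit():
--                 return cur
--             prev, cur = cur, ""
--         else:
--             cur += ch
--     return None
-- ===== Notes on version B (the rewrite author's own statement) =====
-- stated objective: alternative
-- what changed: B replaces A's split('.')-then-enumerate-with-index-lookup loops by a single character-level state machine that streams over the name once, maintaining the previous and current dot-delimited tokens and testing each (previous, current) pair as a token completes; the two duplicated loops collapse into one kind-parameterized path.
import Mathlib
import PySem

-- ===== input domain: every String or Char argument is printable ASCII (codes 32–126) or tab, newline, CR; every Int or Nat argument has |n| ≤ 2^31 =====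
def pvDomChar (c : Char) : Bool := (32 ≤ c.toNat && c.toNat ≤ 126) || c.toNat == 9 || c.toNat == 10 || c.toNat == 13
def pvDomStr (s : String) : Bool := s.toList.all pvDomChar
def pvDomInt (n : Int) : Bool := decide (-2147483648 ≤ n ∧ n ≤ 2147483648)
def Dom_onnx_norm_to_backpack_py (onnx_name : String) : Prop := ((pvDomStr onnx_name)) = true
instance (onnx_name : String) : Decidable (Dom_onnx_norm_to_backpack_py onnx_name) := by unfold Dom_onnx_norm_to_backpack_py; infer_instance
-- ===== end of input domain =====

-- B replaces A's split('.')-then-enumerate-with-index-lookup loops by a single character-level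
-- state machine over the name (previous/current token, test each pair as a token completes);
-- the two duplicated loops collapse into one kind-parameterized path (alternative).

-- ===== PORT A =====
-- A's loop 'for i, p in enumerate(parts): if p.startswith("layers") and i+1 < len(parts) and parts[i+1].isdigit(): return …'
-- (pyGet? parts (i+1) = none exactly when i+1 ≥ len(parts), since i ≥ 0 here — the bounds check and the indexing together)
def pvLoopA (parts : List String) (en : List (Int × String)) (kind : String) : Option String :=
  match en with
  | [] => none
  | (i, p) :: tl =>
    if PySem.Str.startswith p "layers" then
      match PySem.List.pyGet? parts (i + 1) with
      | some q =>
        if PySem.Str.strIsdigit q then some ("layers." ++ q ++ "." ++ kind ++ ".weight")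
        else pvLoopA parts tl kind
      | none => pvLoopA parts tl kind
    else pvLoopA parts tl kind

def onnx_norm_to_backpack_py (onnx_name : String) : Option String :=
  let name := PySem.Str.replace onnx_name "model." ""
  if PySem.Str.isIn "final_norm" name then some "norm.weight" else
  let r1 : Option String :=
    if PySem.Str.isIn "input_layernorm" name then
      let parts := ((PySem.Str.split? name ".").getD [])
      pvLoopA parts (PySem.List.enumerate parts 0) "input_layernorm"
    else none
  match r1 with
  | some s => some s
  | none =>
    let r2 : Option String :=
      if PySem.Str.isIn "post_attention_layernorm" name then
        let parts := ((PySem.Str.split? name ".").getD [])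
        pvLoopA parts (PySem.List.enumerate parts 0) "post_attention_layernorm"
      else none
    match r2 with
    | some s => some s
    | none =>
      if PySem.Str.isIn "norm.weight" name && !(PySem.Str.isIn "layers" name) then
        some "norm.weight"
      else none

-- ===== PORT B =====
-- Source B's _layer_index: one character pass over name + '.', state (prev, cur); the loop's
-- early 'return cur' makes the recursion return an Option. Exact transcription of the loop body.
-- the loop's pair test 'prev is not None and prev.startswith("layers") and cur.isdigit()'
def pvHit (prev : Option (List Char)) (cur : List Char) : Bool :=
  match prev with
  | some p => PySem.Chars.startswith p "layers".toList && PySem.Chars.strIsdigit cur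
  | none => false

def pvMachineB (s : List Char) (prev : Option (List Char)) (cur : List Char) : Option (List Char) :=
  match s with
  | [] => none
  | ch :: rest =>
    if ch = '.' then
      if pvHit prev cur then some cur
      else pvMachineB rest (some cur) []
    else pvMachineB rest prev (cur ++ [ch])

def onnx_norm_to_backpack_py_alt (onnx_name : String) : Option String :=
  let name := PySem.Str.replace onnx_name "model." ""
  if PySem.Str.isIn "final_norm" name then some "norm.weight" else
  let kind? : Option String :=
    if PySem.Str.isIn "input_layernorm" name then some "input_layernorm"
    else if PySem.Str.isIn "post_attention_layernorm" name then some "post_attention_layernorm"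
    else none
  let fromLayers : Option String :=
    match kind? with
    | some kind =>
      (pvMachineB (name.toList ++ ['.']) none []).map
        (fun idx => "layers." ++ String.ofList idx ++ "." ++ kind ++ ".weight")
    | none => none
  match fromLayers with
  | some r => some r
  | none =>
    if PySem.Str.isIn "norm.weight" name && !(PySem.Str.isIn "layers" name) then
      some "norm.weight"
    else none

-- ===== PRECONDITION & SPEC =====
def Spec_onnx_norm_to_backpack_py (onnx_name : String) (out : Option String) : Prop := out = onnx_norm_to_backpack_py_alt onnx_name
instance (onnx_name : String) (out : Option String) : Decidable (Spec_onnx_norm_to_backpack_py onnx_name out) := by unfold Spec_onnx_norm_to_backpack_py; infer_instance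

-- ===== CLAIM (what is proved, stated in full; the proofs are below) =====
def Claim_equal_onnx_norm_to_backpack_py : Prop := ∀ (onnx_name : String), Dom_onnx_norm_to_backpack_py onnx_name → Spec_onnx_norm_to_backpack_py onnx_name (onnx_norm_to_backpack_py onnx_name)

-- ===== LEMMAS AND PROOFS =====

-- Structural characterization of PySem.Chars.splitOn with separator ['.'].
def pvDotSplit : List Char → List (List Char)
  | [] => [[]]
  | c :: rest =>
    if c = '.' then [] :: pvDotSplit rest
    else
      match pvDotSplit rest with
      | [] => [[c]]
      | t :: ts => (c :: t) :: ts

theorem pvDotSplit_ne_nil (cs : List Char) : pvDotSplit cs ≠ [] := by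
  cases cs with
  | nil => simp [pvDotSplit]
  | cons c rest =>
    simp only [pvDotSplit]
    split_ifs
    · simp
    · cases pvDotSplit rest <;> simp

theorem pvSplitOn_go_spec (fuel : Nat) (l cur : List Char) (acc : List (List Char))
    (hf : l.length < fuel) :
    PySem.Chars.splitOn.go ['.'] fuel l cur acc =
      acc.reverse ++ ((pvDotSplit l).modifyHead (cur.reverse ++ ·)) := by
  induction fuel generalizing l cur acc with
  | zero => omega
  | succ f IH =>
    cases l with
    | nil => simp [PySem.Chars.splitOn.go, pvDotSplit]
    | cons c rest =>
      by_cases hc : c = '.'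
      · subst hc
        have hpre : List.isPrefixOf ['.'] ('.' :: rest) = true := by simp [List.isPrefixOf]
        rw [PySem.Chars.splitOn.go, if_pos hpre]
        have hdrop : List.drop ['.'].length ('.' :: rest) = rest := rfl
        rw [hdrop]
        simp only [List.length_cons] at hf
        rw [IH rest [] ((cur.reverse) :: acc) (by omega)]
        simp only [pvDotSplit, List.reverse_cons, List.reverse_nil,
          List.nil_append, List.append_assoc, List.cons_append]
        cases pvDotSplit rest <;> simp
      · have hpre : List.isPrefixOf ['.'] (c :: rest) = false := by
          simp [List.isPrefixOf]
          exact fun h => hc h.symm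
        rw [PySem.Chars.splitOn.go, if_neg (by simp [hpre])]
        simp only [List.length_cons] at hf
        rw [IH rest (c :: cur) acc (by omega)]
        simp only [pvDotSplit, if_neg hc]
        cases h : pvDotSplit rest with
        | nil => exact absurd h (pvDotSplit_ne_nil rest)
        | cons t ts => simp

theorem pvSplitOn_eq_dotSplit (cs : List Char) :
    PySem.Chars.splitOn cs ['.'] = pvDotSplit cs := by
  have h := pvSplitOn_go_spec (cs.length + 1) cs [] [] (by omega)
  rw [PySem.Chars.splitOn] at *
  rw [h]
  cases hd : pvDotSplit cs with
  | nil => exact absurd hd (pvDotSplit_ne_nil cs)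
  | cons t ts => simp

-- B's machine started at a token boundary scans the pairs of the remaining token list.
def pvPairScan (prev : Option (List Char)) (toks : List (List Char)) : Option (List Char) :=
  match toks with
  | [] => none
  | t :: ts =>
    if pvHit prev t then some t
    else pvPairScan (some t) ts

theorem pvMachineB_eq_pairScan (cs : List Char) : ∀ (prev : Option (List Char)) (cur : List Char),
    pvMachineB (cs ++ ['.']) prev cur =
      pvPairScan prev ((pvDotSplit cs).modifyHead (cur ++ ·)) := by
  induction cs with
  | nil =>
    intro prev cur
    simp [pvMachineB, pvDotSplit, pvPairScan]
  | cons c rest IH =>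
    intro prev cur
    by_cases hc : c = '.'
    · subst hc
      by_cases hm : pvHit prev cur = true
      · simp [pvMachineB, pvDotSplit, pvPairScan, hm]
      · have hm' : pvHit prev cur = false := by revert hm; cases pvHit prev cur <;> simp
        have hL : pvMachineB ('.' :: (rest ++ ['.'])) prev cur
            = pvMachineB (rest ++ ['.']) (some cur) [] := by
          simp [pvMachineB, hm']
        rw [List.cons_append, hL, IH (some cur) []]
        have hR : (pvDotSplit ('.' :: rest)).modifyHead (cur ++ ·)
            = cur :: pvDotSplit rest := by
          simp [pvDotSplit]
        rw [hR]
        have hstep : pvPairScan prev (cur :: pvDotSplit rest)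
            = pvPairScan (some cur) (pvDotSplit rest) := by
          simp [pvPairScan, hm']
        rw [hstep]
        cases h : pvDotSplit rest with
        | nil => exact absurd h (pvDotSplit_ne_nil rest)
        | cons t ts => simp
    · simp only [List.cons_append, pvMachineB, pvDotSplit, if_neg hc]
      rw [IH prev (cur ++ [c])]
      cases h : pvDotSplit rest with
      | nil => exact absurd h (pvDotSplit_ne_nil rest)
      | cons t ts => simp

-- A's pair scan over String tokens (the shape pvLoopA reduces to).
def pvScanB (pairs : List (String × String)) : Option String :=
  match pairs with
  | [] => none
  | (a, b) :: tl =>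
    if PySem.Str.startswith a "layers" && PySem.Str.strIsdigit b then some b
    else pvScanB tl

-- A's enumerate/index loop, started at position k, equals the pair scan over the tail pairs.
theorem pvLoopA_eq_scan (parts : List String) (kind : String) :
    ∀ k : Nat, pvLoopA parts (PySem.List.enumerate (parts.drop k) (k : Int)) kind =
      (pvScanB ((parts.drop k).zip (parts.drop (k + 1)))).map
        (fun idx => "layers." ++ idx ++ "." ++ kind ++ ".weight") := by
  have key : ∀ (n k : Nat), parts.length - k = n →
      pvLoopA parts (PySem.List.enumerate (parts.drop k) (k : Int)) kind =
      (pvScanB ((parts.drop k).zip (parts.drop (k + 1)))).map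
        (fun idx => "layers." ++ idx ++ "." ++ kind ++ ".weight") := by
    intro n
    induction n using Nat.strong_induction_on with
    | _ n IH =>
      intro k hk
      cases hd : parts.drop k with
      | nil =>
        have hd1 : parts.drop (k + 1) = [] := by
          rw [← List.tail_drop, hd]
          rfl
        simp [hd1, PySem.List.enumerate, pvLoopA, pvScanB]
      | cons p rest =>
        have hklt : k < parts.length := by
          have h1 := congrArg List.length hd
          simp at h1; omega
        have hrest : parts.drop (k + 1) = rest := by
          rw [← List.tail_drop, hd]
          rfl
        have hget : PySem.List.pyGet? parts ((k : Int) + 1) = parts[k + 1]? := by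
          have hc : ((k : Int) + 1) = ((k + 1 : Nat) : Int) := by push_cast; ring
          rw [hc, PySem.List.pyGet?_natCast]
        have hget2 : parts[k + 1]? = (parts.drop (k + 1)).head? := by
          rw [List.head?_eq_getElem?, List.getElem?_drop]
        have hIH := IH (parts.length - (k + 1)) (by omega) (k + 1) rfl
        have hc1 : (((k + 1 : Nat)) : Int) = (k : Int) + 1 := by push_cast; ring
        rw [hc1] at hIH
        rw [PySem.List.enumerate_cons]
        simp only [pvLoopA, hget, hget2]
        cases hd2 : parts.drop (k + 1) with
        | nil =>
          rw [hrest] at hd2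
          subst hd2
          rw [hrest] at hIH
          simp only [List.head?_nil]
          split_ifs with h1 <;>
            simpa [pvScanB, PySem.List.enumerate] using hIH
        | cons q rest2 =>
          rw [hrest] at hd2
          subst hd2
          have hrest2 : parts.drop (k + 2) = rest2 := by
            rw [show k + 2 = k + 1 + 1 from rfl, ← List.tail_drop, hrest]
            rfl
          rw [hrest, hrest2] at hIH
          simp only [List.head?_cons, List.zip_cons_cons]
          by_cases h1 : PySem.Chars.startswith p.toList ['l','a','y','e','r','s'] = true
          · by_cases h2 : PySem.Chars.strIsdigit q.toList = true
            · simp [h1, h2, pvScanB]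
            · rw [hIH]
              simp [pvScanB, h1, h2]
          · rw [hIH]
            simp [pvScanB, h1]
  intro k; exact key (parts.length - k) k rfl

-- pvPairScan with a primed previous token is the String pair scan over the zipped tokens.
theorem pvPairScan_eq_scanB (toks : List (List Char)) : ∀ p : List Char,
    (pvPairScan (some p) toks).map String.ofList =
      pvScanB (((p :: toks).map String.ofList).zip (toks.map String.ofList)) := by
  induction toks with
  | nil => intro p; simp [pvPairScan, pvScanB]
  | cons t ts IH =>
    intro p
    simp only [pvPairScan, pvScanB, List.map_cons, List.zip_cons_cons]
    have hcond : (PySem.Str.startswith (String.ofList p) "layers"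
        && PySem.Str.strIsdigit (String.ofList t)) = pvHit (some p) t := by
      simp [PySem.Str.startswith, PySem.Str.strIsdigit, pvHit]
    rw [hcond]
    by_cases h : pvHit (some p) t = true
    · simp [h]
    · simp only [h, Bool.false_eq_true, if_false]
      exact IH t

-- The bridge: A's scan over name.split('.') equals B's machine over name's characters.
theorem pvScan_eq_machine (name : String) :
    (pvScanB ((((PySem.Str.split? name ".").getD []).zip
        (((PySem.Str.split? name ".").getD []).tail))) ) =
      (pvMachineB (name.toList ++ ['.']) none []).map String.ofList := by
  have hsplit : (PySem.Str.split? name ".").getD []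
      = (pvDotSplit name.toList).map String.ofList := by
    simp [PySem.Str.split?, PySem.Chars.split?, pvSplitOn_eq_dotSplit]
  rw [pvMachineB_eq_pairScan]
  cases hd : pvDotSplit name.toList with
  | nil => exact absurd hd (pvDotSplit_ne_nil name.toList)
  | cons t ts =>
    simp only [List.modifyHead, List.nil_append]
    rw [show pvPairScan none (t :: ts) = pvPairScan (some t) ts from by simp [pvPairScan, pvHit]]
    rw [pvPairScan_eq_scanB, hsplit, hd]
    simp

theorem onnx_norm_to_backpack_py_eq (onnx_name : String) :
    onnx_norm_to_backpack_py onnx_name = onnx_norm_to_backpack_py_alt onnx_name := by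
  unfold onnx_norm_to_backpack_py onnx_norm_to_backpack_py_alt
  dsimp only
  set name := PySem.Str.replace onnx_name "model." "" with hname
  set parts := (PySem.Str.split? name ".").getD [] with hparts
  have hscan0 := fun kind => pvLoopA_eq_scan parts kind 0
  simp only [List.drop_zero, Nat.cast_zero, Nat.zero_add, List.drop_one] at hscan0
  have hbridge := pvScan_eq_machine name
  rw [← hparts] at hbridge
  have hcomp : ∀ (kind : String),
      Option.map (fun idx => "layers." ++ idx ++ "." ++ kind ++ ".weight")
        (Option.map String.ofList (pvMachineB (name.toList ++ ['.']) none []))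
      = Option.map (fun idx => "layers." ++ String.ofList idx ++ "." ++ kind ++ ".weight")
        (pvMachineB (name.toList ++ ['.']) none []) := by
    intro kind
    cases pvMachineB (name.toList ++ ['.']) none [] <;> simp
  by_cases hfin : PySem.Str.isIn "final_norm" name = true
  · simp only [hfin, if_true]
  · simp only [hfin, Bool.false_eq_true, if_false]
    by_cases hin : PySem.Str.isIn "input_layernorm" name = true
    · simp only [hin, if_true]
      rw [hscan0 "input_layernorm", hbridge, hcomp "input_layernorm"]
      cases hsc : pvMachineB (name.toList ++ ['.']) none [] with
      | some idx => simp
      | none =>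
        simp only [Option.map_none]
        by_cases hpost : PySem.Str.isIn "post_attention_layernorm" name = true
        · simp only [hpost, if_true]
          rw [hscan0 "post_attention_layernorm", hbridge, hsc]
          simp
        · simp only [hpost, Bool.false_eq_true, if_false]
    · simp only [hin, Bool.false_eq_true, if_false]
      by_cases hpost : PySem.Str.isIn "post_attention_layernorm" name = true
      · simp only [hpost, if_true]
        rw [hscan0 "post_attention_layernorm", hbridge, hcomp "post_attention_layernorm"]
      · simp only [hpost, Bool.false_eq_true, if_false]

-- ===== VERDICT (by name: the statement is the Claim_ definition above) =====
theorem onnx_norm_to_backpack_py_spec : Claim_equal_onnx_norm_to_backpack_py := by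
  intro s _
  exact onnx_norm_to_backpack_py_eq s
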